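-- pv_equiv track=rewrite | github.com/rjanant/UK-News-Outlets-Search-System | backend/utils/push_index.py | process_dict_in_batches
-- ===== SOURCE A (Python) =====
-- def process_dict_in_batches(input_dict, batch_size, prefix="w:"):
--     """Deprecated soon"""
--     keys = list(input_dict.keys())
--     num_keys = len(keys)
--     batches = []
--     for i in range(0, num_keys, batch_size):
--         batch_keys = keys[i : i + batch_size]
--         batch = {prefix + key: str(input_dict[key]) for key in batch_keys}
--         batches.append(batch)
--     return batches
-- ===== SOURCE B (Python) =====
-- def process_dict_in_batches(input_dict, batch_size, prefix="w:"):
--     batches = []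
--     current = {}
--     for key, value in input_dict.items():
--         current[prefix + key] = str(value)
--         if len(current) == batch_size:
--             batches.append(current)
--             current = {}
--     if current:
--         batches.append(current)
--     return batches
-- ===== Notes on version B (the rewrite author's own statement) =====
-- stated objective: simpler
-- what changed: Replaces the key-list materialisation and range/slice index arithmetic with a single pass over input_dict.items() that accumulates entries into the current batch and flushes it whenever it reaches batch_size.
-- outside the precondition, e.g. on process_dict_in_batches({'a': '1'}, -1, 'w:'): A returns [], B returns [{'w:a': '1'}]
import Mathlib
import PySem

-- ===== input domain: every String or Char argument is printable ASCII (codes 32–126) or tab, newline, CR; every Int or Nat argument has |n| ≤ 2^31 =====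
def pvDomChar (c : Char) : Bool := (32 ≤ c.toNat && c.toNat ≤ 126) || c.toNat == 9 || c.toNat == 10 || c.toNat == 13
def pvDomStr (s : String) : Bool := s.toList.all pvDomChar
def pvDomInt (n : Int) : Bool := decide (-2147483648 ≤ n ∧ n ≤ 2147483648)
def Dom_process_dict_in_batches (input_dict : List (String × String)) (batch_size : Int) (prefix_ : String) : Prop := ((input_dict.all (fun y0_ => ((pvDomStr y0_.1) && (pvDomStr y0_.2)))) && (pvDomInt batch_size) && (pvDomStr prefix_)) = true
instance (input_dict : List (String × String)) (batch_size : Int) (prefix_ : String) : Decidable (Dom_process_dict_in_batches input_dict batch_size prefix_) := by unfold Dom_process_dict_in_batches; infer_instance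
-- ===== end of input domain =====

-- B replaces A's key-list + range/slice indexing by one accumulate-and-flush pass over the items
-- (objective: simpler; same O(n) cost). Return-value equivalence is proved for batch_size ≥ 1.

-- ===== PORT A =====
def process_dict_in_batches (input_dict : List (String × String)) (batch_size : Int) (prefix_ : String) : List (List (String × String)) :=
  let d := PySem.Dict.ofList input_dict
  let keys := d.keys
  let num_keys : Int := keys.length
  (PySem.List.pyRange 0 num_keys batch_size).foldl
    (fun batches i =>
      let batch_keys := PySem.List.slice keys (some i) (some (i + batch_size))
      let batch := batch_keys.foldl
        (fun bd key => bd.insert (prefix_ ++ key) (d.getD key "")) PySem.Dict.empty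
      batches ++ [batch.items]) []

-- ===== PORT B =====
def process_dict_in_batches_alt (input_dict : List (String × String)) (batch_size : Int) (prefix_ : String) : List (List (String × String)) :=
  let d := PySem.Dict.ofList input_dict
  let st := d.items.foldl
    (fun (st : List (List (String × String)) × PySem.Dict String String) kv =>
      let current := st.2.insert (prefix_ ++ kv.1) kv.2
      if (current.size : Int) = batch_size then (st.1 ++ [current.items], PySem.Dict.empty)
      else (st.1, current))
    ([], PySem.Dict.empty)
  if st.2.items.isEmpty then st.1 else st.1 ++ [st.2.items]

-- ===== PRECONDITION & SPEC =====
-- Pre_ restricts to positive batch sizes, the function's natural domain: at batch_size = 0 A raises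
-- ValueError (range() step 0), and a negative batch size is an invalid input on which no behaviour
-- is specified and either answer is defensible (A yields [], B yields one unflushed batch).
def Pre_process_dict_in_batches (input_dict : List (String × String)) (batch_size : Int) (prefix_ : String) : Prop := 1 ≤ batch_size
instance (input_dict : List (String × String)) (batch_size : Int) (prefix_ : String) : Decidable (Pre_process_dict_in_batches input_dict batch_size prefix_) := by unfold Pre_process_dict_in_batches; infer_instance
def pvWitness_process_dict_in_batches : (List (String × String)) × Int × String := ([("a", "1"), ("b", "2"), ("c", "3")], 2, "w:")

def Spec_process_dict_in_batches (input_dict : List (String × String)) (batch_size : Int) (prefix_ : String) (out : List (List (String × String))) : Prop := out = process_dict_in_batches_alt input_dict batch_size prefix_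
instance (input_dict : List (String × String)) (batch_size : Int) (prefix_ : String) (out : List (List (String × String))) : Decidable (Spec_process_dict_in_batches input_dict batch_size prefix_ out) := by unfold Spec_process_dict_in_batches; infer_instance

-- ===== CLAIM (what is proved, stated in full; the proofs are below) =====
def Claim_equal_process_dict_in_batches : Prop := ∀ (input_dict : List (String × String)) (batch_size : Int) (prefix_ : String), Dom_process_dict_in_batches input_dict batch_size prefix_ → Pre_process_dict_in_batches input_dict batch_size prefix_ → Spec_process_dict_in_batches input_dict batch_size prefix_ (process_dict_in_batches input_dict batch_size prefix_)

-- ===== LEMMAS AND PROOFS =====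
def pvChunks {α : Type} (c : Nat) : Nat → List α → List (List α)
  | _, [] => []
  | 0, _ :: _ => []
  | fuel+1, x :: l => (x :: l).take c :: pvChunks c fuel ((x :: l).drop c)

lemma pvChunks_fuel {α : Type} (c : Nat) (hc : 0 < c) :
    ∀ (f1 f2 : Nat) (l : List α), l.length ≤ f1 → l.length ≤ f2 →
      pvChunks c f1 l = pvChunks c f2 l := by
  intro f1
  induction f1 with
  | zero => intro f2 l h1 h2; cases l with
    | nil => cases f2 <;> rfl
    | cons x l => simp at h1
  | succ f1 ih =>
    intro f2 l h1 h2
    cases l with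
    | nil => cases f2 <;> rfl
    | cons x l =>
      cases f2 with
      | zero => simp at h2
      | succ f2 =>
        simp only [pvChunks]
        congr 1
        apply ih <;> simp only [List.length_drop, List.length_cons] at * <;> omega

lemma pvChunks_map {α β : Type} (c : Nat) (g : α → β) :
    ∀ (fuel : Nat) (l : List α),
      pvChunks c fuel (l.map g) = (pvChunks c fuel l).map (List.map g) := by
  intro fuel
  induction fuel with
  | zero => intro l; cases l <;> rfl
  | succ fuel ih =>
    intro l
    cases l with
    | nil => rfl
    | cons x l =>
      simp only [List.map_cons, pvChunks]
      rw [← List.map_cons (f := g), ← List.map_drop, ih, List.map_take]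

lemma pvChunks_sublist {α : Type} (c : Nat) :
    ∀ (fuel : Nat) (l : List α) (ch : List α), ch ∈ pvChunks c fuel l → ch.Sublist l := by
  intro fuel
  induction fuel with
  | zero => intro l ch h; cases l <;> simp [pvChunks] at h
  | succ fuel ih =>
    intro l ch h
    cases l with
    | nil => simp [pvChunks] at h
    | cons x l =>
      simp only [pvChunks, List.mem_cons] at h
      rcases h with h | h
      · subst h; exact List.take_sublist _ _
      · exact (ih _ _ h).trans (List.drop_sublist _ _)

lemma pvRange_pos_nil (a b s : Int) (hs : 0 < s) (h : b ≤ a) : PySem.List.pyRange a b s = [] := by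
  rw [PySem.List.pyRange_of_pos _ _ hs, if_neg (by omega)]
  rfl

lemma pvRange_pos_cons (a b s : Int) (hs : 0 < s) (h : a < b) :
    PySem.List.pyRange a b s = a :: PySem.List.pyRange (a + s) b s := by
  rw [PySem.List.pyRange_of_pos _ _ hs, PySem.List.pyRange_of_pos _ _ hs, if_pos h]
  have key : (b - a + s - 1) / s = (b - a - 1) / s + 1 := by
    have : b - a + s - 1 = (b - a - 1) + 1 * s := by ring
    rw [this, Int.add_mul_ediv_right _ _ (by omega)]
  have hnn : 0 ≤ (b - a - 1) / s := Int.ediv_nonneg (by omega) (by omega)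
  have htn : ((b - a + s - 1) / s).toNat = ((b - a - 1) / s).toNat + 1 := by omega
  rw [htn, List.range_succ_eq_map, List.map_cons, List.map_map]
  congr 1
  · simp
  · have hrhs : (if a + s < b then ((b - (a + s) + s - 1) / s).toNat else 0)
        = ((b - a - 1) / s).toNat := by
      by_cases hc : a + s < b
      · rw [if_pos hc]; congr 2; ring_nf
      · rw [if_neg hc]
        have : (b - a - 1) / s = 0 := Int.ediv_eq_zero_of_lt (by omega) (by omega)
        omega
    rw [hrhs]
    apply List.map_congr_left
    intro k _
    simp [Nat.succ_eq_add_one]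
    ring

lemma pvAloop (d : PySem.Dict String String) (prefix_ : String) (b : Int) (hb : 1 ≤ b) :
    ∀ (fuel : Nat) (i : Int) (acc : List (List (String × String))), 0 ≤ i →
      d.keys.length ≤ i.toNat + fuel →
      (PySem.List.pyRange i (d.keys.length : Int) b).foldl
        (fun batches j => batches ++
          [((PySem.List.slice d.keys (some j) (some (j + b))).foldl
              (fun bd key => bd.insert (prefix_ ++ key) (d.getD key "")) PySem.Dict.empty).items])
        acc
      = acc ++ (pvChunks b.toNat fuel (d.keys.drop i.toNat)).map
          (fun ks => (ks.foldl
              (fun bd key => bd.insert (prefix_ ++ key) (d.getD key "")) PySem.Dict.empty).items) := by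
  intro fuel
  induction fuel with
  | zero =>
    intro i acc hi hlen
    have hdrop : d.keys.drop i.toNat = [] := List.drop_eq_nil_of_le (by omega)
    rw [pvRange_pos_nil _ _ _ (by omega) (by omega), hdrop]
    simp [pvChunks]
  | succ fuel ih =>
    intro i acc hi hlen
    by_cases hend : (d.keys.length : Int) ≤ i
    · have hdrop : d.keys.drop i.toNat = [] := List.drop_eq_nil_of_le (by omega)
      rw [pvRange_pos_nil _ _ _ (by omega) hend, hdrop]
      simp [pvChunks]
    · have hlt : i < (d.keys.length : Int) := by omega
      rw [pvRange_pos_cons _ _ _ (by omega) hlt]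
      simp only [List.foldl_cons]
      rw [ih (i + b) _ (by omega) (by omega)]
      have hslice : PySem.List.slice d.keys (some i) (some (i + b))
          = (d.keys.drop i.toNat).take b.toNat := by
        rw [PySem.List.slice_toNat _ hi (by omega)]
        congr 1
        omega
      have hdd : d.keys.drop (i + b).toNat = (d.keys.drop i.toNat).drop b.toNat := by
        rw [List.drop_drop]
        congr 1
        omega
      have hne : d.keys.drop i.toNat ≠ [] := by
        intro h
        have := congrArg List.length h
        simp at this
        omega
      obtain ⟨x, l, hxl⟩ := List.exists_cons_of_ne_nil hne
      rw [hslice, hdd, hxl]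
      simp [pvChunks]

def pvG (prefix_ : String) (p : String × String) : String × String := (prefix_ ++ p.1, p.2)

lemma pvBatch (d : PySem.Dict String String) (hnd : d.keys.Nodup) (prefix_ : String)
    (ch : List (String × String)) (hsub : ch.Sublist d.items) :
    ((ch.map (fun p => p.1)).foldl
        (fun bd key => bd.insert (prefix_ ++ key) (d.getD key "")) PySem.Dict.empty).items
      = ch.map (pvG prefix_) := by
  rw [PySem.Dict.items_foldl_insert_fresh (ch.map (fun p => p.1))
        (fun key => prefix_ ++ key) (fun key => d.getD key "") PySem.Dict.empty
        (by intro a _; exact PySem.Dict.contains_empty _)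
        (by
          apply List.Nodup.map
          · intro a b hab
            exact (String.append_right_inj prefix_).mp hab
          · exact hnd.sublist (hsub.map _))]
  simp only [PySem.Dict.empty, List.map_map]
  show List.map _ _ = _
  apply List.map_congr_left
  intro p hp
  have hmem : (p.1, p.2) ∈ d.items := by
    simpa using hsub.mem hp
  simp [Function.comp, pvG, PySem.Dict.getD_of_mem_items d hmem hnd]

lemma pvA_eq (input_dict : List (String × String)) (batch_size : Int) (prefix_ : String)
    (hb : 1 ≤ batch_size) :
    process_dict_in_batches input_dict batch_size prefix_
      = (pvChunks batch_size.toNat (PySem.Dict.ofList input_dict).items.length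
            (PySem.Dict.ofList input_dict).items).map (List.map (pvG prefix_)) := by
  simp only [process_dict_in_batches]
  rw [pvAloop (PySem.Dict.ofList input_dict) prefix_ batch_size hb
        (PySem.Dict.ofList input_dict).keys.length 0 [] le_rfl (by simp)]
  have hkeys : (PySem.Dict.ofList input_dict).keys
      = (PySem.Dict.ofList input_dict).items.map (fun p => p.1) := rfl
  rw [List.nil_append, show Int.toNat 0 = 0 from rfl, List.drop_zero, hkeys, List.length_map, pvChunks_map]
  rw [List.map_map]
  apply List.map_congr_left
  intro ch hch
  exact pvBatch _ (PySem.Dict.nodup_keys_ofList input_dict) prefix_ ch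
    (pvChunks_sublist _ _ _ _ hch)

def pvStep (b : Int) (prefix_ : String)
    (st : List (List (String × String)) × List (String × String)) (x : String × String) :
    List (List (String × String)) × List (String × String) :=
  let cur := st.2 ++ [x]
  if (cur.length : Int) = b then (st.1 ++ [cur.map (pvG prefix_)], []) else (st.1, cur)

lemma pvB_pure (b : Int) (prefix_ : String) :
    ∀ (l m : List (String × String)) (bs : List (List (String × String))),
      ((m ++ l).map (fun p => prefix_ ++ p.1)).Nodup →
      (let st := l.foldl
          (fun (st : List (List (String × String)) × PySem.Dict String String) kv =>
            let current := st.2.insert (prefix_ ++ kv.1) kv.2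
            if (current.size : Int) = b then (st.1 ++ [current.items], PySem.Dict.empty)
            else (st.1, current))
          (bs, PySem.Dict.mk (m.map (pvG prefix_)))
       if st.2.items.isEmpty then st.1 else st.1 ++ [st.2.items])
      = (let st := l.foldl (pvStep b prefix_) (bs, m)
         if st.2.isEmpty then st.1 else st.1 ++ [st.2.map (pvG prefix_)]) := by
  intro l
  induction l with
  | nil =>
    intro m bs _
    cases m <;> simp [pvG]
  | cons x l ih =>
    intro m bs hnd
    have hkeys : (PySem.Dict.mk (List.map (pvG prefix_) m)).keys
        = m.map (fun p => prefix_ ++ p.1) := by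
      simp [PySem.Dict.keys, pvG, List.map_map, Function.comp]
    have hnotmem : prefix_ ++ x.1 ∉ m.map (fun p => prefix_ ++ p.1) := by
      rw [List.map_append, List.nodup_append] at hnd
      intro hmem
      have hx : prefix_ ++ x.1 ∈ List.map (fun p => prefix_ ++ p.1) (x :: l) :=
        List.mem_map_of_mem (List.mem_cons_self ..)
      exact hnd.2.2 _ hmem _ hx rfl
    have hfresh : (PySem.Dict.mk (List.map (pvG prefix_) m)).contains (prefix_ ++ x.1) = false := by
      by_contra hcon
      have htrue : (PySem.Dict.mk (List.map (pvG prefix_) m)).contains (prefix_ ++ x.1) = true := by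
        revert hcon
        cases (PySem.Dict.mk (List.map (pvG prefix_) m)).contains (prefix_ ++ x.1) <;> simp
      rw [PySem.Dict.contains_iff_mem_keys, hkeys] at htrue
      exact hnotmem htrue
    have hins : (PySem.Dict.mk (List.map (pvG prefix_) m)).insert (prefix_ ++ x.1) x.2
        = PySem.Dict.mk ((m ++ [x]).map (pvG prefix_)) := by
      apply PySem.Dict.ext
      rw [PySem.Dict.items_insert_of_not_contains _ _ hfresh]
      simp [pvG]
    have hsz : ((PySem.Dict.mk ((m ++ [x]).map (pvG prefix_))).size : Int)
        = (((m ++ [x]).length : Nat) : Int) := by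
      simp [PySem.Dict.size]
    simp only [List.foldl_cons, pvStep]
    rw [hins]
    by_cases hc : (((m ++ [x]).length : Nat) : Int) = b
    · have hstart : (if ((PySem.Dict.mk ((m ++ [x]).map (pvG prefix_))).size : Int) = b
          then (bs ++ [(PySem.Dict.mk ((m ++ [x]).map (pvG prefix_))).items],
                (PySem.Dict.empty : PySem.Dict String String))
          else (bs, PySem.Dict.mk ((m ++ [x]).map (pvG prefix_))))
          = (bs ++ [(m ++ [x]).map (pvG prefix_)], PySem.Dict.mk (List.map (pvG prefix_) [])) := by
        rw [hsz, if_pos hc]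
        rfl
      have hpstart : (if (((m ++ [x]).length : Nat) : Int) = b
          then (bs ++ [(m ++ [x]).map (pvG prefix_)], ([] : List (String × String)))
          else (bs, m ++ [x]))
          = (bs ++ [(m ++ [x]).map (pvG prefix_)], ([] : List (String × String))) := if_pos hc
      rw [hstart, hpstart]
      apply ih
      simp only [List.nil_append]
      exact hnd.sublist (List.Sublist.map _ (by simp))
    · have hstart : (if ((PySem.Dict.mk ((m ++ [x]).map (pvG prefix_))).size : Int) = b
          then (bs ++ [(PySem.Dict.mk ((m ++ [x]).map (pvG prefix_))).items],
                (PySem.Dict.empty : PySem.Dict String String))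
          else (bs, PySem.Dict.mk ((m ++ [x]).map (pvG prefix_))))
          = (bs, PySem.Dict.mk (List.map (pvG prefix_) (m ++ [x]))) := by
        rw [hsz, if_neg hc]
      have hpstart : (if (((m ++ [x]).length : Nat) : Int) = b
          then (bs ++ [(m ++ [x]).map (pvG prefix_)], ([] : List (String × String)))
          else (bs, m ++ [x]))
          = (bs, m ++ [x]) := if_neg hc
      rw [hstart, hpstart]
      apply ih
      have hassoc : (m ++ [x]) ++ l = m ++ x :: l := by simp
      rw [hassoc]
      exact hnd

lemma pvPure_chunks (b : Int) (prefix_ : String) (hb : 1 ≤ b) :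
    ∀ (l m : List (String × String)) (bs : List (List (String × String))),
      m.length < b.toNat →
      (let st := l.foldl (pvStep b prefix_) (bs, m)
       if st.2.isEmpty then st.1 else st.1 ++ [st.2.map (pvG prefix_)])
      = bs ++ (pvChunks b.toNat (m ++ l).length (m ++ l)).map (List.map (pvG prefix_)) := by
  intro l
  induction l with
  | nil =>
    intro m bs hm
    cases m with
    | nil => simp [pvChunks]
    | cons y m' =>
      simp only [List.foldl_nil, List.append_nil, List.length_cons, pvChunks]
      rw [List.take_of_length_le (by simp at hm ⊢; omega),
          List.drop_eq_nil_of_le (by simp at hm ⊢; omega)]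
      have : pvChunks b.toNat m'.length ([] : List (String × String)) = [] := by
        cases m'.length <;> rfl
      rw [this]
      simp
  | cons x l ih =>
    intro m bs hm
    simp only [List.foldl_cons, pvStep]
    by_cases hc : (((m ++ [x]).length : Nat) : Int) = b
    · rw [if_pos hc]
      rw [ih [] (bs ++ [(m ++ [x]).map (pvG prefix_)]) (by simp only [List.length_nil]; omega)]
      have hclen : (m ++ [x]).length = b.toNat := by simp at hc ⊢; omega
      have hL : m ++ x :: l = (m ++ [x]) ++ l := by simp
      rw [hL]
      obtain ⟨z, rest, hzr⟩ : ∃ z rest, (m ++ [x]) ++ l = z :: rest :=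
        List.exists_cons_of_ne_nil (by simp)
      rw [hzr]
      have hlen : (z :: rest).length = rest.length + 1 := rfl
      rw [hlen]
      simp only [pvChunks]
      have htake : List.take b.toNat (m ++ [x] ++ l) = m ++ [x] := by
        rw [← hclen]; exact List.take_left
      have hdrop : List.drop b.toNat (m ++ [x] ++ l) = l := by
        rw [← hclen]; exact List.drop_left
      rw [← hzr, htake, hdrop]
      have hrest : l.length ≤ rest.length := by
        have := congrArg List.length hzr
        simp at this
        omega
      simp only [List.nil_append]
      rw [pvChunks_fuel b.toNat (by omega) l.length rest.length l le_rfl hrest]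
      simp
    · rw [if_neg hc]
      rw [ih (m ++ [x]) bs (by simp at hc ⊢; omega)]
      have hL : (m ++ [x]) ++ l = m ++ x :: l := by simp
      rw [hL]

lemma pvB_eq (input_dict : List (String × String)) (batch_size : Int) (prefix_ : String)
    (hb : 1 ≤ batch_size) :
    process_dict_in_batches_alt input_dict batch_size prefix_
      = (pvChunks batch_size.toNat (PySem.Dict.ofList input_dict).items.length
            (PySem.Dict.ofList input_dict).items).map (List.map (pvG prefix_)) := by
  have hnd : ((([] : List (String × String)) ++ (PySem.Dict.ofList input_dict).items).map
      (fun p => prefix_ ++ p.1)).Nodup := by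
    simp only [List.nil_append]
    have : (PySem.Dict.ofList input_dict).items.map (fun p => prefix_ ++ p.1)
        = ((PySem.Dict.ofList input_dict).items.map (fun p => p.1)).map
            (fun k => prefix_ ++ k) := by
      simp [List.map_map, Function.comp]
    rw [this]
    apply List.Nodup.map
    · intro a c hac
      exact (String.append_right_inj prefix_).mp hac
    · exact PySem.Dict.nodup_keys_ofList input_dict
  have h1 := pvB_pure batch_size prefix_ (PySem.Dict.ofList input_dict).items [] [] hnd
  have h2 := pvPure_chunks batch_size prefix_ hb (PySem.Dict.ofList input_dict).items [] [] (by simp only [List.length_nil]; omega)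
  simp only [List.nil_append] at h1 h2
  show (let st := (PySem.Dict.ofList input_dict).items.foldl _ ([], PySem.Dict.mk (List.map (pvG prefix_) []))
        if st.2.items.isEmpty then st.1 else st.1 ++ [st.2.items]) = _
  rw [h1, h2]

-- ===== VERDICT (by name: the statement is the Claim_ definition above) =====
theorem process_dict_in_batches_spec : Claim_equal_process_dict_in_batches := by
  intro input_dict batch_size prefix_ _ hpre
  unfold Spec_process_dict_in_batches
  rw [pvA_eq input_dict batch_size prefix_ hpre, pvB_eq input_dict batch_size prefix_ hpre]
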